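-- pv_equiv track=rewrite | github.com/jaronjlee/algorithms | coding_challenges/roblox.py/other.py | deleteProducts
-- ===== SOURCE A (Python) =====
-- from collections import Counter
--
-- def deleteProducts(ids, m):
--     countHash = {}
--     for id in ids:
--         if id not in countHash:
--             countHash[id] = 0
--         countHash[id] += 1
--
--     arr = []
--     for id in sorted(countHash, key=countHash.get, reverse=False):
--         for i in range(0, countHash[id]):
--             arr.append(id)
--
--     leftToRemove = m
--     while leftToRemove > 0 and len(arr) > 0:
--         arr.pop(0)
--         leftToRemove -= 1
--
--     unique = Counter(arr).keys()
--     return len(unique)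
-- ===== SOURCE B (Python) =====
-- def deleteProducts(ids, m):
--     counts = {}
--     for i in ids:
--         counts[i] = counts.get(i, 0) + 1
--     removed = 0
--     remaining = m
--     for c in sorted(counts.values()):
--         if remaining < c:
--             break
--         remaining -= c
--         removed += 1
--     return len(counts) - removed
-- ===== Notes on version B (the rewrite author's own statement) =====
-- stated objective: faster
-- what changed: Instead of materialising the whole multiset sorted by frequency and popping m items one by one from the front (each pop(0) is O(n)), B sorts only the per-id counts and greedily subtracts whole groups from m, returning total groups minus fully-removed groups.
import Mathlib
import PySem

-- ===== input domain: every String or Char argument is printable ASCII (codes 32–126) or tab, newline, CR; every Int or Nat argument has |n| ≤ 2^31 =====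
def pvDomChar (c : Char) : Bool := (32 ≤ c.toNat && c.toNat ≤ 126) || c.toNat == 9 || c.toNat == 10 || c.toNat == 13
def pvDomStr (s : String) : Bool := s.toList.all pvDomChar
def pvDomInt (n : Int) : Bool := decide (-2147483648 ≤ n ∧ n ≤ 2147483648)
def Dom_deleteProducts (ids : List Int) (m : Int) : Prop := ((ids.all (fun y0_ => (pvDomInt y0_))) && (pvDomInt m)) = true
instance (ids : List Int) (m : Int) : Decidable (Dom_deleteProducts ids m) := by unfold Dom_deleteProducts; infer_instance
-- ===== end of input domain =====

-- B replaces A's "build the whole multiset sorted by frequency and pop m items from the front"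
-- with "sort the per-id counts and subtract whole groups from m"; equivalence of return values is proved.

-- ===== PORT A =====
-- the while loop `while leftToRemove > 0 and len(arr) > 0: arr.pop(0); leftToRemove -= 1`
def aDrop : List Int → Int → List Int
  | [], _ => []
  | x :: xs, l => if 0 < l then aDrop xs (l - 1) else x :: xs

def deleteProducts (ids : List Int) (m : Int) : Int :=
  let countHash := ids.foldl (fun d id =>
      let d' := if d.contains id then d else d.insert id 0   -- if id not in countHash: countHash[id] = 0
      d'.insert id (d'.getD id 0 + 1)) PySem.Dict.empty       -- countHash[id] += 1
  let keysSorted := PySem.List.sorted countHash.keys (fun k => countHash.getD k 0) false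
  let arr := keysSorted.foldl (fun arr id =>
      (PySem.List.pyRange 0 (countHash.getD id 0) 1).foldl (fun a _ => a ++ [id]) arr) []
  let arr' := aDrop arr m
  ((PySem.Dict.counter arr').keys.length : Int)               -- len(Counter(arr).keys())

-- ===== PORT B =====
-- the for loop over sorted counts with break, carrying (remaining, removed)
def bLoop : List Int → Int → Int → Int
  | [], _, removed => removed
  | c :: cs, remaining, removed =>
      if remaining < c then removed else bLoop cs (remaining - c) (removed + 1)

def deleteProducts_alt (ids : List Int) (m : Int) : Int :=
  let counts := ids.foldl (fun d i => d.insert i (d.getD i 0 + 1)) PySem.Dict.empty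
  let removed := bLoop (PySem.List.sorted counts.values (fun x => x) false) m 0
  (counts.size : Int) - removed

-- ===== PRECONDITION & SPEC =====
def Spec_deleteProducts (ids : List Int) (m : Int) (out : Int) : Prop := out = deleteProducts_alt ids m
instance (ids : List Int) (m : Int) (out : Int) : Decidable (Spec_deleteProducts ids m out) := by unfold Spec_deleteProducts; infer_instance

-- ===== CLAIM (what is proved, stated in full; the proofs are below) =====
def Claim_equal_deleteProducts : Prop := ∀ (ids : List Int) (m : Int), Dom_deleteProducts ids m → Spec_deleteProducts ids m (deleteProducts ids m)

-- ===== LEMMAS AND PROOFS =====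

theorem pv_step_eq (d : PySem.Dict Int Int) (x : Int) :
    (let d' := if d.contains x then d else d.insert x 0
     d'.insert x (d'.getD x 0 + 1)) = d.insert x (d.getD x 0 + 1) := by
  by_cases h : d.contains x
  · simp [h]
  · have hc : d.contains x = false := by simpa using h
    simp only [h, Bool.false_eq_true, if_false]
    rw [PySem.Dict.getD_insert_self, PySem.Dict.insert_insert_self]
    simp [PySem.Dict.getD_of_not_contains, hc]

theorem pv_countHash_eq (ids : List Int) :
    ids.foldl (fun d id =>
      let d' := if d.contains id then d else d.insert id 0
      d'.insert id (d'.getD id 0 + 1)) PySem.Dict.empty = PySem.Dict.counter ids := by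
  rw [show (fun (d : PySem.Dict Int Int) id =>
      let d' := if d.contains id then d else d.insert id 0
      d'.insert id (d'.getD id 0 + 1)) = fun d x => d.insert x (d.getD x 0 + 1) from
    funext fun d => funext fun x => pv_step_eq d x]
  exact PySem.Dict.foldl_insert_getD_add_one_eq_counter ids

theorem pv_foldl_append_singleton (x : Int) : ∀ (l : List Int) (a : List Int),
    l.foldl (fun a _ => a ++ [x]) a = a ++ List.replicate l.length x
  | [], a => by simp
  | _ :: t, a => by
      simp only [List.foldl_cons, List.length_cons, pv_foldl_append_singleton x t]
      simp [List.replicate_succ]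

theorem pv_bLoop_acc : ∀ (cs : List Int) (rem r : Int), bLoop cs rem r = r + bLoop cs rem 0
  | [], rem, r => by simp [bLoop]
  | c :: cs, rem, r => by
      by_cases h : rem < c
      · simp [bLoop, h]
      · simp only [bLoop, h, if_false]
        rw [pv_bLoop_acc cs (rem - c) (r + 1), pv_bLoop_acc cs (rem - c) (0 + 1)]
        ring

theorem pv_aDrop_le (k : Int) : ∀ (n : Nat) (rest : List Int) (rem : Int), (n : Int) ≤ rem →
    aDrop (List.replicate n k ++ rest) rem = aDrop rest (rem - n)
  | 0, rest, rem, _ => by simp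
  | n + 1, rest, rem, h => by
      have h0 : 0 < rem := by push_cast at h; omega
      simp only [List.replicate_succ, List.cons_append, aDrop, h0, if_true]
      rw [pv_aDrop_le k n rest (rem - 1) (by push_cast at h ⊢; omega)]
      congr 1
      push_cast
      ring

theorem pv_aDrop_lt (k : Int) : ∀ (n : Nat) (rest : List Int) (rem : Int), 0 < n → rem < (n : Int) →
    ∃ j : Nat, 0 < j ∧ aDrop (List.replicate n k ++ rest) rem = List.replicate j k ++ rest
  | 0, _, _, hn, _ => absurd hn (by omega)
  | n + 1, rest, rem, _, h => by
      by_cases h0 : 0 < rem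
      · simp only [List.replicate_succ, List.cons_append, aDrop, h0, if_true]
        exact pv_aDrop_lt k n rest (rem - 1) (by push_cast at h ⊢; omega) (by push_cast at h ⊢; omega)
      · refine ⟨n + 1, Nat.succ_pos n, ?_⟩
        simp [List.replicate_succ, aDrop, h0]

theorem pv_foldl_add_cons (a : Int) : ∀ (xs s : List Int), a ∉ xs →
    xs.foldl PySem.Set.add (a :: s) = a :: xs.foldl PySem.Set.add s
  | [], s, _ => rfl
  | x :: xs, s, h => by
      have hxa : ¬ (x = a) := fun he => h (he ▸ List.mem_cons_self)
      have : PySem.Set.add (a :: s) x = a :: PySem.Set.add s x := by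
        simp [PySem.Set.add, PySem.Set.contains, hxa]
        split_ifs <;> simp
      rw [List.foldl_cons, this, List.foldl_cons,
          pv_foldl_add_cons a xs (PySem.Set.add s x) (fun hm => h (List.mem_cons_of_mem x hm))]

theorem pv_foldl_add_mem (k : Int) : ∀ (n : Nat) (s : List Int), k ∈ s →
    (List.replicate n k).foldl PySem.Set.add s = s
  | 0, s, _ => rfl
  | n + 1, s, h => by
      have : PySem.Set.add s k = s := by simp [PySem.Set.add, PySem.Set.contains, h]
      rw [List.replicate_succ, List.foldl_cons, this, pv_foldl_add_mem k n s h]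

theorem pv_ofList_replicate_append (k : Int) (j : Nat) (rest : List Int)
    (hj : 0 < j) (h : k ∉ rest) :
    PySem.Set.ofList (List.replicate j k ++ rest) = k :: PySem.Set.ofList rest := by
  obtain ⟨j', rfl⟩ : ∃ j', j = j' + 1 := ⟨j - 1, by omega⟩
  rw [PySem.Set.ofList_eq_foldl, List.foldl_append, List.replicate_succ, List.foldl_cons]
  have h1 : PySem.Set.add ([] : List Int) k = [k] := rfl
  rw [h1, pv_foldl_add_mem k j' [k] (List.mem_singleton.mpr rfl),
      show ([k] : List Int) = k :: [] from rfl, pv_foldl_add_cons k rest [] h,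
      ← PySem.Set.ofList_eq_foldl]

theorem pv_ofList_nodup_length (f : Int → Nat) : ∀ (ks : List Int), ks.Nodup →
    (∀ k ∈ ks, 0 < f k) →
    (PySem.Set.ofList (ks.flatMap (fun k => List.replicate (f k) k))).length = ks.length
  | [], _, _ => rfl
  | k :: ks, hnd, hpos => by
      have hk : k ∉ ks.flatMap (fun k => List.replicate (f k) k) := by
        intro hm
        obtain ⟨k', hk', hmem⟩ := List.mem_flatMap.mp hm
        rw [List.eq_of_mem_replicate hmem] at hnd
        exact (List.nodup_cons.mp hnd).1 hk'
      simp only [List.flatMap_cons]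
      rw [pv_ofList_replicate_append k (f k) _ (hpos k List.mem_cons_self) hk]
      simp [pv_ofList_nodup_length f ks (List.nodup_cons.mp hnd).2
        (fun k' h => hpos k' (List.mem_cons_of_mem k h))]

theorem pv_main (f : Int → Nat) : ∀ (ks : List Int) (rem : Int), ks.Nodup → (∀ k ∈ ks, 0 < f k) →
    ((PySem.Set.ofList (aDrop (ks.flatMap (fun k => List.replicate (f k) k)) rem)).length : Int)
      = (ks.length : Int) - bLoop (ks.map (fun k => (f k : Int))) rem 0
  | [], rem, _, _ => by simp [aDrop, bLoop, PySem.Set.ofList]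
  | k :: ks, rem, hnd, hpos => by
      have hk : k ∉ ks.flatMap (fun k => List.replicate (f k) k) := by
        intro hm
        obtain ⟨k', hk', hmem⟩ := List.mem_flatMap.mp hm
        rw [List.eq_of_mem_replicate hmem] at hnd
        exact (List.nodup_cons.mp hnd).1 hk'
      have hnd' : ks.Nodup := (List.nodup_cons.mp hnd).2
      have hpos' : ∀ k' ∈ ks, 0 < f k' := fun k' h => hpos k' (List.mem_cons_of_mem k h)
      simp only [List.flatMap_cons, List.map_cons]
      by_cases h : rem < (f k : Int)
      · obtain ⟨j, hj, heq⟩ := pv_aDrop_lt k (f k) _ rem (hpos k List.mem_cons_self) h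
        rw [heq, pv_ofList_replicate_append k j _ hj hk]
        have := pv_ofList_nodup_length f ks hnd' hpos'
        simp only [bLoop, h, if_true, List.length_cons]
        push_cast
        omega
      · rw [pv_aDrop_le k (f k) _ rem (by omega)]
        have ih := pv_main f ks (rem - (f k : Int)) hnd' hpos'
        simp only [bLoop, h, if_false, List.length_cons]
        rw [pv_bLoop_acc _ _ (0 + 1), ih]
        push_cast
        ring

theorem pv_outer (g : Int → Int) : ∀ (ks : List Int) (acc : List Int),
    ks.foldl (fun arr id => (PySem.List.pyRange 0 (g id) 1).foldl (fun a _ => a ++ [id]) arr) acc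
      = acc ++ ks.flatMap (fun k => List.replicate (g k).toNat k)
  | [], acc => by simp
  | k :: ks, acc => by
      rw [List.foldl_cons, pv_outer g ks, pv_foldl_append_singleton k,
          PySem.List.length_pyRange_one]
      simp [List.append_assoc]

theorem pv_final (ids : List Int) (m : Int) : deleteProducts ids m = deleteProducts_alt ids m := by
  have hcnt : ∀ v : Int, (PySem.Dict.counter ids).getD v 0 = ((ids.count v : Int)) := fun v =>
    PySem.Dict.getD_counter ids v
  simp only [deleteProducts, deleteProducts_alt, pv_countHash_eq,
    PySem.Dict.foldl_insert_getD_add_one_eq_counter,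
    PySem.Dict.values_eq_map_keys (PySem.Dict.counter ids) (PySem.Dict.nodup_keys_counter ids) 0,
    hcnt, PySem.Dict.keys_counter, pv_outer, List.nil_append, Int.toNat_natCast]
  set S := PySem.Set.ofList ids with hS
  set cnt : Int → Int := fun k => ((ids.count k : Int)) with hcntdef
  set ks := PySem.List.sorted S cnt false with hks
  have hSnd : S.Nodup := PySem.Set.nodup_ofList ids
  have hksperm : ks.Perm S := PySem.List.sorted_perm S cnt false
  have hksnd : ks.Nodup := hksperm.symm.nodup hSnd
  have hpos : ∀ k ∈ ks, 0 < ids.count k := by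
    intro k hk
    have h1 : k ∈ S := (PySem.List.mem_sorted S cnt false k).mp hk
    have h2 : k ∈ ids := (PySem.Set.mem_ofList ids k).mp h1
    exact List.count_pos_iff.mpr h2
  have hsortvals : PySem.List.sorted (S.map cnt) (fun x => x) false = ks.map cnt := by
    refine PySem.List.sorted_id_eq_of_perm_of_pairwise _ _ (hksperm.map cnt) ?_
    exact PySem.List.sorted_map_key_pairwise S cnt
  have hsize : (PySem.Dict.counter ids).size = ks.length := by
    have h1 : (PySem.Dict.counter ids).keys.length = S.length := by
      rw [PySem.Dict.keys_counter]
    have hl : S.length = ks.length := hksperm.length_eq.symm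
    simpa [PySem.Dict.size, PySem.Dict.keys, List.length_map] using h1.trans hl
  rw [hsortvals, hsize]
  exact pv_main (fun k => ids.count k) ks m hksnd hpos

-- ===== VERDICT (by name: the statement is the Claim_ definition above) =====
theorem deleteProducts_spec : Claim_equal_deleteProducts := by
  intro ids m _
  exact pv_final ids m
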